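-- pv_equiv track=rewrite | github.com/myvoltron/algorithm-notebook | class_3/problem_9019.py | bfs
-- ===== SOURCE A (Python) =====
-- from collections import deque
--
-- def rotate_left(v):
--     n1 = v // 1000
--     n2 = (v % 1000) // 100
--     n3 = ((v % 1000) % 100) // 10
--     n4 = (((v % 1000) % 100) % 10) // 1
--
--     return ((n2 * 10 + n3) * 10 + n4) * 10 + n1
--
-- def rotate_right(v):
--     n1 = v // 1000
--     n2 = (v % 1000) // 100
--     n3 = ((v % 1000) % 100) // 10
--     n4 = (((v % 1000) % 100) % 10) // 1
--
--     return ((n4 * 10 + n1) * 10 + n2) * 10 + n3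
--
-- def bfs(start, end, visited):
--     q = deque([(start, "")])
--     visited[start] = True
--
--     while q:
--         v = q.popleft()
--
--         for i in [
--             (v[0] * 2 % 10000, "D"),
--             (9999 if v[0] == 0 else v[0] - 1, "S"),
--             (rotate_left(v[0]), "L"),
--             (rotate_right(v[0]), "R"),
--         ]:
--             if i[0] == end:
--                 return v[1] + i[1]
--             if not visited[i[0]]:
--                 visited[i[0]] = True
--                 q.append((i[0], v[1] + i[1]))
-- ===== SOURCE B (Python) =====
-- from collections import deque
--
-- def _digits(v):
--     n1, r = divmod(v, 1000)
--     n2, r = divmod(r, 100)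
--     n3, n4 = divmod(r, 10)
--     return n1, n2, n3, n4
--
-- def _neighbors(v):
--     n1, n2, n3, n4 = _digits(v)
--     return (
--         (v * 2 % 10000, "D"),
--         (9999 if v == 0 else v - 1, "S"),
--         (n2 * 1000 + n3 * 100 + n4 * 10 + n1, "L"),
--         (n4 * 1000 + n1 * 100 + n2 * 10 + n3, "R"),
--     )
--
-- def bfs(start, end, visited):
--     # Value-only FIFO queue plus a back-pointer dict (state -> (parent, op));
--     # the answer string is rebuilt by prepending ops while walking back to start.
--     visited[start] = True
--     parent = {}
--     q = deque([start])
--     while q: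
--         v = q.popleft()
--         for nv, op in _neighbors(v):
--             if nv == end:
--                 path = op
--                 cur = v
--                 while cur != start:
--                     cur, pc = parent[cur]
--                     path = pc + path
--                 return path
--             if not visited[nv]:
--                 visited[nv] = True
--                 parent[nv] = (v, op)
--                 q.append(nv)
-- ===== Notes on version B (the rewrite author's own statement) =====
-- stated objective: alternative
-- what changed: B's BFS queue carries bare state values and a back-pointer dict (state -> (parent, op)); when end is generated the answer is rebuilt by walking back-pointers and prepending ops, and the digit rotations are computed with a divmod chain instead of nested %-// expressions, instead of A's queue of (state, growing path string) pairs.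
import Mathlib
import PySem

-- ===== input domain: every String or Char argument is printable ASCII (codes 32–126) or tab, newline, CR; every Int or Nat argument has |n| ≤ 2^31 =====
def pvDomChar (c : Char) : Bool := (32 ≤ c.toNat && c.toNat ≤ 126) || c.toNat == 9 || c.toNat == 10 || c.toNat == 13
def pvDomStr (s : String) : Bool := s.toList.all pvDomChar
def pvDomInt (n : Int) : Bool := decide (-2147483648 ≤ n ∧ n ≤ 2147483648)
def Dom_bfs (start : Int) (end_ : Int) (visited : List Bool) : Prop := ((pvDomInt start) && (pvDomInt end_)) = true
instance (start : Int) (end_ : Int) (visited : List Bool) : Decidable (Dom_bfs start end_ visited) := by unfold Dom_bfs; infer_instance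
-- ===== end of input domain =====

-- B replaces A's queue of (state, path-string) pairs by a queue of bare states plus a
-- back-pointer dict (state -> (parent, op)), rebuilding the answer by prepending ops while
-- walking the pointers back to start, with rotations via a divmod chain; both Pythons
-- mutate `visited` identically, the theorems are about the return value only.

-- ===== PORT A =====
-- rotate_left / rotate_right (same-module helpers used by A)
def pvRotL (v : Int) : Int :=
  let n1 := PySem.Int.floordiv v 1000
  let n2 := PySem.Int.floordiv (PySem.Int.mod v 1000) 100
  let n3 := PySem.Int.floordiv (PySem.Int.mod (PySem.Int.mod v 1000) 100) 10
  let n4 := PySem.Int.floordiv (PySem.Int.mod (PySem.Int.mod (PySem.Int.mod v 1000) 100) 10) 1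
  ((n2 * 10 + n3) * 10 + n4) * 10 + n1

def pvRotR (v : Int) : Int :=
  let n1 := PySem.Int.floordiv v 1000
  let n2 := PySem.Int.floordiv (PySem.Int.mod v 1000) 100
  let n3 := PySem.Int.floordiv (PySem.Int.mod (PySem.Int.mod v 1000) 100) 10
  let n4 := PySem.Int.floordiv (PySem.Int.mod (PySem.Int.mod (PySem.Int.mod v 1000) 100) 10) 1
  ((n4 * 10 + n1) * 10 + n2) * 10 + n3

-- the literal 4-element neighbour list A iterates, in order D, S, L, R
def pvNbrs (v : Int) : List (Int × String) :=
  [(PySem.Int.mod (v * 2) 10000, "D"),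
   (if v == 0 then 9999 else v - 1, "S"),
   (pvRotL v, "L"),
   (pvRotR v, "R")]

-- A's inner `for i in [...]` loop: early return = .inl, fall-through state = .inr
def pvStepA (end_ : Int) : List (Int × String) → Int × String → List (Int × String) → List Bool →
    Sum String (List (Int × String) × List Bool)
  | [], _, q, vis => .inr (q, vis)
  | (nv, c) :: rest, vs, q, vis =>
    if nv == end_ then .inl (vs.2 ++ c)
    else if !(PySem.List.pyGetD vis nv false) then
      pvStepA end_ rest vs (q ++ [(nv, vs.2 ++ c)]) (PySem.List.pySetD vis nv true)
    else pvStepA end_ rest vs q vis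

-- A's `while q` loop (fuel is only a termination guard; Python returns None on queue
-- exhaustion, which Pre_ excludes, and the fuel case is unreachable under Pre_)
def pvLoopA (end_ : Int) : Nat → List (Int × String) → List Bool → String
  | 0, _, _ => ""
  | _ + 1, [], _ => ""
  | n + 1, vs :: rest, vis =>
    match pvStepA end_ (pvNbrs vs.1) vs rest vis with
    | .inl r => r
    | .inr (q', vis') => pvLoopA end_ n q' vis'

def bfs (start : Int) (end_ : Int) (visited : List Bool) : String :=
  pvLoopA end_ 20000 [(start, "")] (PySem.List.pySetD visited start true)

-- ===== PORT B =====
-- B's `_digits`: divmod chain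
def pvDigitsB (v : Int) : Int × Int × Int × Int :=
  let n1 := PySem.Int.floordiv v 1000
  let r1 := PySem.Int.mod v 1000
  let n2 := PySem.Int.floordiv r1 100
  let r2 := PySem.Int.mod r1 100
  let n3 := PySem.Int.floordiv r2 10
  let n4 := PySem.Int.mod r2 10
  (n1, n2, n3, n4)

-- B's `_neighbors`
def pvNbrsB (v : Int) : List (Int × String) :=
  match pvDigitsB v with
  | (n1, n2, n3, n4) =>
    [(PySem.Int.mod (v * 2) 10000, "D"),
     (if v == 0 then 9999 else v - 1, "S"),
     (n2 * 1000 + n3 * 100 + n4 * 10 + n1, "L"),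
     (n4 * 1000 + n1 * 100 + n2 * 10 + n3, "R")]

-- B's `while cur != start` reconstruction walk, prepending ops (fuel is a termination
-- guard; under the loop invariant back-pointer chains are acyclic and short)
def pvWalk (start : Int) : Nat → PySem.Dict Int (Int × String) → Int → String → String
  | 0, _, _, path => path
  | n + 1, parent, cur, path =>
    if cur == start then path
    else
      match PySem.Dict.get? parent cur with
      | none => path  -- Python would raise KeyError; unreachable under the invariant
      | some (p, pc) => pvWalk start n parent p (pc ++ path)

-- B's inner `for nv, op in _neighbors(v)` loop over value-only queue + back-pointer dict
def pvStepB (start end_ : Int) : List (Int × String) → Int → List Int →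
    PySem.Dict Int (Int × String) → List Bool →
    Except String (List Int × PySem.Dict Int (Int × String) × List Bool)
  | [], _, q, parent, vis => .ok (q, parent, vis)
  | (nv, op) :: rest, v, q, parent, vis =>
    if nv == end_ then .error (pvWalk start (parent.items.length + 1) parent v op)
    else if !(PySem.List.pyGetD vis nv false) then
      pvStepB start end_ rest v (q ++ [nv]) (parent.insert nv (v, op)) (PySem.List.pySetD vis nv true)
    else pvStepB start end_ rest v q parent vis

def pvLoopB (start end_ : Int) : Nat → List Int → PySem.Dict Int (Int × String) → List Bool → String
  | 0, _, _, _ => ""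
  | _ + 1, [], _, _ => ""
  | n + 1, v :: rest, parent, vis =>
    match pvStepB start end_ (pvNbrsB v) v rest parent vis with
    | .error r => r
    | .ok (q', parent', vis') => pvLoopB start end_ n q' parent' vis'

def bfs_alt (start : Int) (end_ : Int) (visited : List Bool) : String :=
  pvLoopB start end_ 20000 [start] PySem.Dict.empty (PySem.List.pySetD visited start true)

-- ===== PRECONDITION & SPEC =====
-- Pre_ is the problem's natural call — 4-digit states with a fresh all-False visited array of
-- length ≥ 10000 (problem 9019 passes [False]*10000) — plus the first-iteration-hit region.
-- It excludes inputs on which A raises IndexError (out-of-range/negative indices) or can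
-- exhaust the queue and return None (pre-marked cells); whether A returns on the remaining
-- partial/pre-marked arrays depends on running the search, so they stay outside Pre_, and on
-- such inputs where A does return, B returns the same value (no cite: any such input needs a ~10000-element array literal).
-- The second disjunct is the first-iteration-hit region: end is one of start's four
-- neighbours (and the visited reads made before the hit are in range), so A answers with a
-- one-op string whatever the visited array holds beyond the touched indices.
def Pre_bfs (start : Int) (end_ : Int) (visited : List Bool) : Prop :=
  (0 ≤ start ∧ start < 10000 ∧ 0 ≤ end_ ∧ end_ < 10000 ∧
    10000 ≤ visited.length ∧ visited.take 10000 = List.replicate 10000 false) ∨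
  (0 ≤ start ∧ start < visited.length ∧
    (end_ = PySem.Int.mod (start * 2) 10000 ∨
     (end_ = (if start == 0 then 9999 else start - 1) ∧
       PySem.Int.mod (start * 2) 10000 < visited.length) ∨
     (end_ = pvRotL start ∧ PySem.Int.mod (start * 2) 10000 < visited.length ∧
       (if start == 0 then 9999 else start - 1) < visited.length) ∨
     (end_ = pvRotR start ∧ PySem.Int.mod (start * 2) 10000 < visited.length ∧
       (if start == 0 then 9999 else start - 1) < visited.length ∧
       pvRotL start < visited.length)))
instance (start : Int) (end_ : Int) (visited : List Bool) : Decidable (Pre_bfs start end_ visited) := by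
  unfold Pre_bfs; infer_instance

def pvWitness_bfs : Int × Int × List Bool := (0, 0, [false])

def Spec_bfs (start : Int) (end_ : Int) (visited : List Bool) (out : String) : Prop := out = bfs_alt start end_ visited
instance (start : Int) (end_ : Int) (visited : List Bool) (out : String) : Decidable (Spec_bfs start end_ visited out) := by unfold Spec_bfs; infer_instance

-- ===== CLAIM (what is proved, stated in full; the proofs are below) =====
def Claim_equal_bfs : Prop := ∀ (start : Int) (end_ : Int) (visited : List Bool), Dom_bfs start end_ visited → Pre_bfs start end_ visited → Spec_bfs start end_ visited (bfs start end_ visited)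

-- ===== LEMMAS AND PROOFS =====

-- B's neighbour list computes the same four (value, op) pairs as A's
theorem pvNbrsB_eq (v : Int) : pvNbrsB v = pvNbrs v := by
  have e1 : ∀ a : Int, PySem.Int.floordiv a 1 = a := by
    intro a
    rw [PySem.Int.floordiv_eq_ediv_of_pos (by norm_num)]
    exact Int.ediv_one a
  simp only [pvNbrsB, pvDigitsB, pvNbrs, pvRotL, pvRotR, e1, List.cons.injEq, Prod.mk.injEq,
    and_true, true_and]
  exact ⟨by ring, by ring⟩

-- `pvChain parent start n v s`: following back-pointers from v reaches start in n steps and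
-- the collected op string (root-to-v) is s — exactly "A's queued path string for v".
inductive pvChain (parent : PySem.Dict Int (Int × String)) (start : Int) : Nat → Int → String → Prop
  | base : pvChain parent start 0 start ""
  | step {n : Nat} {v p : Int} {c s : String} (hne : v ≠ start)
      (hget : parent.get? v = some (p, c)) (hc : pvChain parent start n p s) :
      pvChain parent start (n + 1) v (s ++ c)

-- the lockstep invariant tying B's (queue, parent, visited) to A's (queue, visited)
def pvInv (start : Int) (parent : PySem.Dict Int (Int × String)) (vis : List Bool)
    (qA : List (Int × String)) : Prop :=
  10000 ≤ vis.length ∧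
  (∀ k pc, parent.get? k = some pc → 0 ≤ k ∧ k < 10000 ∧ PySem.List.pyGetD vis k false = true) ∧
  (0 ≤ start ∧ start < 10000 ∧ PySem.List.pyGetD vis start false = true) ∧
  (∀ vs ∈ qA, 0 ≤ vs.1 ∧ vs.1 < 10000 ∧
     ∃ n, n ≤ parent.items.length ∧ pvChain parent start n vs.1 vs.2)

theorem pvNbrs_range (v : Int) (h0 : 0 ≤ v) (h1 : v < 10000) :
    ∀ x ∈ pvNbrs v, 0 ≤ x.1 ∧ x.1 < 10000 := by
  have e1000 : ∀ a : Int, PySem.Int.floordiv a 1000 = a / 1000 :=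
    fun a => PySem.Int.floordiv_eq_ediv_of_pos (by norm_num)
  have e100 : ∀ a : Int, PySem.Int.floordiv a 100 = a / 100 :=
    fun a => PySem.Int.floordiv_eq_ediv_of_pos (by norm_num)
  have e10 : ∀ a : Int, PySem.Int.floordiv a 10 = a / 10 :=
    fun a => PySem.Int.floordiv_eq_ediv_of_pos (by norm_num)
  have e1 : ∀ a : Int, PySem.Int.floordiv a 1 = a / 1 :=
    fun a => PySem.Int.floordiv_eq_ediv_of_pos (by norm_num)
  have m1000 : ∀ a : Int, PySem.Int.mod a 1000 = a % 1000 :=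
    fun a => PySem.Int.mod_eq_emod_of_pos (by norm_num)
  have m100 : ∀ a : Int, PySem.Int.mod a 100 = a % 100 :=
    fun a => PySem.Int.mod_eq_emod_of_pos (by norm_num)
  have m10 : ∀ a : Int, PySem.Int.mod a 10 = a % 10 :=
    fun a => PySem.Int.mod_eq_emod_of_pos (by norm_num)
  intro x hx
  simp only [pvNbrs, List.mem_cons, List.not_mem_nil, or_false] at hx
  rcases hx with rfl | rfl | rfl | rfl
  · exact ⟨PySem.Int.mod_nonneg _ (by norm_num), PySem.Int.mod_lt _ (by norm_num)⟩
  · by_cases h : v = 0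
    · simp [h]
    · simp [h]
      omega
  · simp only [pvRotL, e1000, e100, e10, e1, m1000, m100, m10]
    constructor <;> omega
  · simp only [pvRotR, e1000, e100, e10, e1, m1000, m100, m10]
    constructor <;> omega

theorem pvChain_insert {parent : PySem.Dict Int (Int × String)} {start : Int} {n : Nat}
    {v : Int} {s : String} {k : Int} {x : Int × String}
    (hk : parent.get? k = none) (h : pvChain parent start n v s) :
    pvChain (parent.insert k x) start n v s := by
  induction h with
  | base => exact pvChain.base
  | step hne hget _ ih =>
    refine pvChain.step hne ?_ ih
    rw [PySem.Dict.get?_insert_of_ne _ _ (by rintro rfl; rw [hk] at hget; cases hget)]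
    exact hget

-- the back-pointer walk, started at v with `acc` already collected, yields s ++ acc
theorem pvWalk_spec {parent : PySem.Dict Int (Int × String)} {start : Int} {n : Nat}
    {v : Int} {s : String} (h : pvChain parent start n v s) :
    ∀ (fuel : Nat) (acc : String), n < fuel → pvWalk start fuel parent v acc = s ++ acc := by
  induction h with
  | base =>
    intro fuel acc hf
    match fuel, hf with
    | m + 1, _ => simp [pvWalk]
  | @step n v p c s hne hget _ ih =>
    intro fuel acc hf
    match fuel, hf with
    | m + 1, hf =>
      have hvne : (v == start) = false := by simp [hne]
      simp only [pvWalk, hvne, Bool.false_eq_true, if_false, hget]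
      rw [ih m (c ++ acc) (by omega)]
      rw [String.append_assoc]

theorem pv_getD_set_mono {vis : List Bool} {i k : Int} (hk0 : 0 ≤ k) (hk1 : k < vis.length)
    (hi0 : 0 ≤ i) (h : PySem.List.pyGetD vis k false = true) :
    PySem.List.pyGetD (PySem.List.pySetD vis i true) k false = true := by
  rw [PySem.List.pySetD_of_nonneg _ _ hi0,
    PySem.List.pyGetD_eq_getElem _ _ hk0 (by simpa using hk1), List.getElem_set]
  rw [PySem.List.pyGetD_eq_getElem _ _ hk0 (by simpa using hk1)] at h
  split
  · rfl
  · exact h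

theorem pv_getD_set_self {vis : List Bool} {i : Int} (h0 : 0 ≤ i) (h1 : i < vis.length) :
    PySem.List.pyGetD (PySem.List.pySetD vis i true) i false = true := by
  rw [PySem.List.pySetD_of_nonneg _ _ h0,
    PySem.List.pyGetD_eq_getElem _ _ h0 (by simpa using h1)]
  rw [List.getElem_set]
  simp

def pvRel (start : Int) : Sum String (List (Int × String) × List Bool) →
    Except String (List Int × PySem.Dict Int (Int × String) × List Bool) → Prop
  | .inl r, .error r' => r = r'
  | .inr (q, vis), .ok (q', parent', vis') =>
      q' = q.map Prod.fst ∧ vis' = vis ∧ pvInv start parent' vis' q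
  | _, _ => False

theorem pvStep_rel (start end_ : Int) :
    ∀ (ns : List (Int × String)) (vs : Int × String) (qA : List (Int × String))
      (parent : PySem.Dict Int (Int × String)) (vis : List Bool),
      (∀ x ∈ ns, 0 ≤ x.1 ∧ x.1 < 10000) →
      pvInv start parent vis qA →
      (∃ n, n ≤ parent.items.length ∧ pvChain parent start n vs.1 vs.2) →
      pvRel start (pvStepA end_ ns vs qA vis)
        (pvStepB start end_ ns vs.1 (qA.map Prod.fst) parent vis) := by
  intro ns
  induction ns with
  | nil =>
    intro vs qA parent vis _ hInv _
    exact ⟨rfl, rfl, hInv⟩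
  | cons hd rest ih =>
    obtain ⟨nv, c⟩ := hd
    intro vs qA parent vis hr hInv hch
    obtain ⟨hnv0, hnv1⟩ := hr (nv, c) (List.mem_cons_self ..)
    have hrest : ∀ x ∈ rest, 0 ≤ x.1 ∧ x.1 < 10000 := fun x hx => hr x (List.mem_cons_of_mem _ hx)
    obtain ⟨hlen, hI1, ⟨hs0, hs1, hsv⟩, hq⟩ := hInv
    by_cases he : nv = end_
    · obtain ⟨n, hn, hc⟩ := hch
      have hb : (nv == end_) = true := by simp [he]
      simp only [pvStepA, pvStepB, hb, if_true]
      show vs.2 ++ c = pvWalk start (parent.items.length + 1) parent vs.1 c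
      rw [pvWalk_spec hc (parent.items.length + 1) c (by omega)]
    · have hb : (nv == end_) = false := by simp [he]
      by_cases hv : PySem.List.pyGetD vis nv false = true
      · simp only [pvStepA, pvStepB, hb, Bool.false_eq_true, if_false, hv, Bool.not_true,
          Bool.false_eq_true, if_false]
        exact ih vs qA parent vis hrest ⟨hlen, hI1, ⟨hs0, hs1, hsv⟩, hq⟩ hch
      · have hv' : PySem.List.pyGetD vis nv false = false := by
          cases hxx : PySem.List.pyGetD vis nv false
          · rfl
          · exact absurd hxx hv
        -- nv is undiscovered: fresh dict key, ≠ start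
        have hfresh : parent.get? nv = none := by
          cases hg : parent.get? nv with
          | none => rfl
          | some pc => exact absurd ((hI1 nv pc hg).2.2) hv
        have hnvs : nv ≠ start := by rintro rfl; rw [hsv] at hv'; cases hv'
        have hcont : parent.contains nv = false := by
          rw [PySem.Dict.contains_eq_isSome_get?, hfresh]; rfl
        have hitems : (parent.insert nv (vs.1, c)).items = parent.items ++ [(nv, (vs.1, c))] :=
          PySem.Dict.items_insert_of_not_contains _ _ hcont
        have hlen' : (parent.insert nv (vs.1, c)).items.length = parent.items.length + 1 := by
          rw [hitems]; simp
        obtain ⟨n, hn, hc⟩ := hch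
        simp only [pvStepA, pvStepB, hb, Bool.false_eq_true, if_false, hv', Bool.not_false, if_true]
        have hmap : (qA ++ [(nv, vs.2 ++ c)]).map Prod.fst = qA.map Prod.fst ++ [nv] := by simp
        rw [← hmap]
        apply ih
        · exact hrest
        · -- invariant for the extended state
          refine ⟨by rw [PySem.List.length_pySetD]; exact hlen, ?_, ?_, ?_⟩
          · intro k pc hg
            rw [PySem.Dict.get?_insert] at hg
            split at hg
            · rename_i hkk
              subst hkk
              exact ⟨hnv0, hnv1, pv_getD_set_self hnv0 (by omega)⟩
            · obtain ⟨k0, k1, kv⟩ := hI1 k pc hg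
              exact ⟨k0, k1, pv_getD_set_mono k0 (by omega) hnv0 kv⟩
          · exact ⟨hs0, hs1, pv_getD_set_mono hs0 (by omega) hnv0 hsv⟩
          · intro ws hws
            rw [List.mem_append] at hws
            rcases hws with hws | hws
            · obtain ⟨w0, w1, m, hm, hmc⟩ := hq ws hws
              exact ⟨w0, w1, m, by omega, pvChain_insert hfresh hmc⟩
            · rw [List.mem_singleton] at hws
              subst hws
              refine ⟨hnv0, hnv1, n + 1, by omega, ?_⟩
              exact pvChain.step hnvs (PySem.Dict.get?_insert_self ..) (pvChain_insert hfresh hc)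
        · exact ⟨n, by omega, pvChain_insert hfresh hc⟩

theorem pvLoop_eq (start end_ : Int) :
    ∀ (fuel : Nat) (qA : List (Int × String)) (parent : PySem.Dict Int (Int × String))
      (vis : List Bool), pvInv start parent vis qA →
      pvLoopA end_ fuel qA vis = pvLoopB start end_ fuel (qA.map Prod.fst) parent vis := by
  intro fuel
  induction fuel with
  | zero => intro qA parent vis _; rfl
  | succ m ih =>
    intro qA parent vis hInv
    match qA with
    | [] => rfl
    | vs :: rest =>
      obtain ⟨v0, v1, hchain⟩ := hInv.2.2.2 vs (List.mem_cons_self ..)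
      have hrest : pvInv start parent vis rest :=
        ⟨hInv.1, hInv.2.1, hInv.2.2.1, fun w hw => hInv.2.2.2 w (List.mem_cons_of_mem _ hw)⟩
      have hrel := pvStep_rel start end_ (pvNbrs vs.1) vs rest parent vis
        (pvNbrs_range vs.1 v0 v1) hrest hchain
      simp only [List.map_cons, pvLoopA, pvLoopB, pvNbrsB_eq]
      cases hA : pvStepA end_ (pvNbrs vs.1) vs rest vis with
      | inl r =>
        cases hB : pvStepB start end_ (pvNbrs vs.1) vs.1 (rest.map Prod.fst) parent vis with
        | error r' => rw [hA, hB] at hrel; exact hrel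
        | ok st => rw [hA, hB] at hrel; exact absurd hrel (by simp [pvRel])
      | inr st =>
        obtain ⟨q', vis'⟩ := st
        cases hB : pvStepB start end_ (pvNbrs vs.1) vs.1 (rest.map Prod.fst) parent vis with
        | error r' => rw [hA, hB] at hrel; exact absurd hrel (by simp [pvRel])
        | ok st' =>
          obtain ⟨qB', parent', visB'⟩ := st'
          rw [hA, hB] at hrel
          obtain ⟨hq, hvis, hInv'⟩ := hrel
          rw [hq, ← hvis]
          exact ih q' parent' visB' hInv'

theorem pvStep_first_hit (start end_ : Int) :
    ∀ (ns : List (Int × String)) (qA : List (Int × String)) (qB : List Int)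
      (parent : PySem.Dict Int (Int × String)) (vis : List Bool),
      (∃ x ∈ ns, x.1 = end_) →
      ∃ c : String, pvStepA end_ ns (start, "") qA vis = .inl ("" ++ c) ∧
        pvStepB start end_ ns start qB parent vis = .error c := by
  intro ns
  induction ns with
  | nil =>
    rintro _ _ _ _ ⟨x, hx, _⟩
    cases hx
  | cons hd rest ih =>
    obtain ⟨nv, c⟩ := hd
    intro qA qB parent vis hhit
    by_cases he : nv = end_
    · refine ⟨c, ?_, ?_⟩
      · simp [pvStepA, he]
      · simp [pvStepB, he, pvWalk]
    · have hhit' : ∃ x ∈ rest, x.1 = end_ := by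
        obtain ⟨x, hx, hxe⟩ := hhit
        rcases List.mem_cons.mp hx with rfl | hx'
        · exact absurd hxe he
        · exact ⟨x, hx', hxe⟩
      have hb : (nv == end_) = false := by simp [he]
      by_cases hv : PySem.List.pyGetD vis nv false = true
      · simpa [pvStepA, pvStepB, hb, hv] using ih qA qB parent vis hhit'
      · have hv' : PySem.List.pyGetD vis nv false = false := by
          revert hv; cases PySem.List.pyGetD vis nv false <;> simp
        simpa [pvStepA, pvStepB, hb, hv'] using
          ih (qA ++ [(nv, "" ++ c)]) (qB ++ [nv]) (parent.insert nv (start, c))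
            (PySem.List.pySetD vis nv true) hhit'

-- ===== VERDICT (by name: the statement is the Claim_ definition above) =====
theorem bfs_spec : Claim_equal_bfs := by
  intro start end_ visited _ hpre
  show bfs start end_ visited = bfs_alt start end_ visited
  rcases hpre with ⟨h0, h1, _, _, hlen, _⟩ | ⟨_, _, he⟩
  case inr =>
    -- first-iteration hit: both return at the same neighbour of start
    have hhit : ∃ x ∈ pvNbrs start, x.1 = end_ := by
      simp only [pvNbrs]
      rcases he with he | ⟨he, _⟩ | ⟨he, _⟩ | ⟨he, _⟩
      · exact ⟨_, List.mem_cons_self .., he.symm⟩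
      · exact ⟨_, List.mem_cons_of_mem _ (List.mem_cons_self ..), he.symm⟩
      · exact ⟨_, List.mem_cons_of_mem _ (List.mem_cons_of_mem _ (List.mem_cons_self ..)), he.symm⟩
      · exact ⟨_, List.mem_cons_of_mem _ (List.mem_cons_of_mem _ (List.mem_cons_of_mem _
          (List.mem_cons_self ..))), he.symm⟩
    obtain ⟨c, hA, hB⟩ := pvStep_first_hit start end_ (pvNbrs start) [] [] PySem.Dict.empty
      (PySem.List.pySetD visited start true) hhit
    have e : (20000 : Nat) = 19999 + 1 := rfl
    unfold bfs bfs_alt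
    rw [e]
    simp only [pvLoopA, pvLoopB, pvNbrsB_eq]
    rw [hA, hB]
    simp
  unfold bfs bfs_alt
  have : [start] = [(start, ("" : String))].map Prod.fst := by simp
  rw [this]
  apply pvLoop_eq
  refine ⟨by rw [PySem.List.length_pySetD]; omega, ?_, ?_, ?_⟩
  · intro k pc hg; rw [PySem.Dict.get?_empty] at hg; cases hg
  · exact ⟨h0, h1, pv_getD_set_self h0 (by omega)⟩
  · intro ws hws
    rw [List.mem_singleton] at hws
    subst hws
    exact ⟨h0, h1, 0, Nat.zero_le _, pvChain.base⟩
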